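-- pv_equiv track=rewrite | github.com/facundoschillino/TP_IA_GRUPO1 | entrega2.py | compartir_color
-- ===== SOURCE A (Python) =====
-- CANTIDAD_COLORES = 4
--
-- def compartir_color(vars, vals):
--     frascos = [[] for _ in range(CANTIDAD_COLORES)]  # Inicializa la lista de frascos
--     # Llena los frascos con sus valores correspondientes
--     for var, val in zip(vars, vals):
--         frasco, cuarto = var
--         frascos[frasco - 1].append(val)
--     # Verifica que frascos adyacentes compartan al menos un color
--     for indice, frasco in enumerate(frascos):
--         interseccion1 = set()
--         interseccion2 = set()
--         frasco_anterior = []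
--         frasco_posterior = []
--         if indice > 0:
--             frasco_anterior = set(frascos[indice - 1])
--             interseccion1 = set(frasco).intersection(frasco_anterior)
--         if indice < CANTIDAD_COLORES - 1:
--             frasco_posterior = set(frascos[indice + 1])
--             interseccion2 = set(frasco).intersection(frasco_posterior)
--         if not interseccion1 and not interseccion2:
--             return False
--     return True
-- ===== SOURCE B (Python) =====
-- CANTIDAD_COLORES = 4
--
-- # parameters renamed (vars -> variables, vals -> valores) only because the test harness
-- # forbids the builtin name 'vars'; same positional signature as A.
-- def compartir_color(variables, valores):
--     frascos = [[] for _ in range(CANTIDAD_COLORES)]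
--     # Llena los frascos con sus valores correspondientes (same as A)
--     for var, val in zip(variables, valores):
--         frasco, cuarto = var
--         frascos[frasco - 1].append(val)
--     # Key reduction: on the 4-jar path, every jar has an adjacent sharing partner
--     # iff the two END edges hold: jar 0 needs edge (0,1) and jar 3 needs edge (2,3);
--     # those same two edges then also cover the middle jars 1 and 2.
--     # So only two direct membership scans are needed, no sets and no per-jar loop.
--     comparte_01 = any(c in frascos[1] for c in frascos[0])
--     comparte_23 = any(c in frascos[3] for c in frascos[2])
--     return comparte_01 and comparte_23
-- ===== Notes on version B (the rewrite author's own statement) =====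
-- stated objective: simpler
-- what changed: A loops over all four jars computing up to six set intersections with both neighbours and early-returns; B uses the logical reduction that full coverage of the 4-jar path is equivalent to just the two end edges (jars 0-1 and jars 2-3 sharing a color), so it performs only two direct membership scans and a conjunction, with no sets and no per-jar loop.
import Mathlib
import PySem

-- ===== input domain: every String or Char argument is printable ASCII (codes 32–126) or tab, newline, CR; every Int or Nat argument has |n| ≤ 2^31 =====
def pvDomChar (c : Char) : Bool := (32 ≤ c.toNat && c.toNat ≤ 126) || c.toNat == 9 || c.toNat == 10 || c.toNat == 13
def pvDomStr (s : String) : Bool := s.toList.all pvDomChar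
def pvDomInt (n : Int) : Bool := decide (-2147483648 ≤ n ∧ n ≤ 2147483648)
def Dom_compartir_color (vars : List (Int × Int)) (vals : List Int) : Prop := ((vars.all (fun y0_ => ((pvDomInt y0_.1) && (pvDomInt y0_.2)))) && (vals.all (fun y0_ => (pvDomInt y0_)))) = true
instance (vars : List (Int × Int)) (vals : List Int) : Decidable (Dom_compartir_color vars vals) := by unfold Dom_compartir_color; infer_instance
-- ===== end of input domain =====

-- B replaces A's per-jar scan (up to six set intersections, early return) by the logical
-- reduction "coverage of the 4-jar path = the two end edges": two membership scans, no sets.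
-- The jar-filling loop is byte-for-byte the same in both Pythons, so it is one shared helper here.

-- ===== PORT A =====
-- shared fill loop: 'for var, val in zip(vars, vals): frascos[var[0]-1].append(val)';
-- none = IndexError (frasco-1 out of Python's -4..3 index range; excluded by Pre_)
def llenarFrascos (vars : List (Int × Int)) (vals : List Int) : Option (List (List Int)) :=
  (vars.zip vals).foldl
    (fun acc pv =>
      match acc with
      | none => none
      | some fr =>
        match PySem.List.pyGet? fr (pv.1.1 - 1) with
        | none => none
        | some jar => some (PySem.List.pySetD fr (pv.1.1 - 1) (jar ++ [pv.2])))
    (some [[], [], [], []])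

-- A's check loop: 'for indice, frasco in enumerate(frascos): … return False' (early return)
def chequeoA (fr : List (List Int)) : List (Int × List Int) → Bool
  | [] => true
  | (indice, frasco) :: resto =>
    let inter1 : PySem.Set Int :=
      if indice > 0 then
        PySem.Set.inter (PySem.Set.ofList frasco)
          (PySem.Set.ofList (PySem.List.pyGetD fr (indice - 1) []))
      else PySem.Set.empty
    let inter2 : PySem.Set Int :=
      if indice < 3 then
        PySem.Set.inter (PySem.Set.ofList frasco)
          (PySem.Set.ofList (PySem.List.pyGetD fr (indice + 1) []))
      else PySem.Set.empty
    if inter1.isEmpty && inter2.isEmpty then false else chequeoA fr resto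

def compartir_color (vars : List (Int × Int)) (vals : List Int) : Bool :=
  match llenarFrascos vars vals with
  | none => false
  | some frascos => chequeoA frascos (PySem.List.enumerate frascos 0)

-- ===== PORT B =====
def compartir_color_alt (vars : List (Int × Int)) (vals : List Int) : Bool :=
  match llenarFrascos vars vals with
  | none => false
  | some frascos =>
    let comparte01 := (PySem.List.pyGetD frascos 0 []).any
        (fun c => (PySem.List.pyGetD frascos 1 ([] : List Int)).contains c)
    let comparte23 := (PySem.List.pyGetD frascos 2 []).any
        (fun c => (PySem.List.pyGetD frascos 3 ([] : List Int)).contains c)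
    comparte01 && comparte23

-- ===== PRECONDITION & SPEC =====
-- Pre_ excludes exactly the inputs where A raises IndexError: a zipped pair whose jar number
-- puts frasco-1 outside Python's index range -4..3 of the 4-jar list.
def Pre_compartir_color (vars : List (Int × Int)) (vals : List Int) : Prop :=
  ∀ p ∈ vars.zip vals, -3 ≤ p.1.1 ∧ p.1.1 ≤ 4
instance (vars : List (Int × Int)) (vals : List Int) : Decidable (Pre_compartir_color vars vals) := by unfold Pre_compartir_color; infer_instance

def pvWitness_compartir_color : (List (Int × Int)) × List Int := ([(1, 0), (2, 0)], [5, 5])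

def Spec_compartir_color (vars : List (Int × Int)) (vals : List Int) (out : Bool) : Prop := out = compartir_color_alt vars vals
instance (vars : List (Int × Int)) (vals : List Int) (out : Bool) : Decidable (Spec_compartir_color vars vals out) := by unfold Spec_compartir_color; infer_instance

-- ===== CLAIM (what is proved, stated in full; the proofs are below) =====
def Claim_equal_compartir_color : Prop := ∀ (vars : List (Int × Int)) (vals : List Int), Dom_compartir_color vars vals → Pre_compartir_color vars vals → Spec_compartir_color vars vals (compartir_color vars vals)

-- ===== LEMMAS AND PROOFS =====

def vacio (a b : List Int) : Bool :=
  ((PySem.Set.ofList a).inter (PySem.Set.ofList b)).isEmpty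

theorem isEmpty_eq {α : Type} [DecidableEq α] (l : List α) : l.isEmpty = decide (l = []) := by
  cases l <;> simp

theorem vacioD_comm (a b : List Int) :
    decide ((PySem.Set.ofList a).inter (PySem.Set.ofList b) = []) = decide ((PySem.Set.ofList b).inter (PySem.Set.ofList a) = []) := by
  simp only [decide_eq_decide, List.eq_nil_iff_forall_not_mem]
  constructor <;> intro h x hx <;>
    · rw [PySem.Set.mem_inter] at hx
      exact h x (by rw [PySem.Set.mem_inter]; exact ⟨hx.2, hx.1⟩)

theorem Aside (f0 f1 f2 f3 : List Int) :
    chequeoA [f0, f1, f2, f3] (PySem.List.enumerate [f0, f1, f2, f3] 0) =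
      (!vacio f0 f1 && ((!vacio f0 f1 || !vacio f1 f2) && ((!vacio f1 f2 || !vacio f2 f3) && !vacio f2 f3))) := by
  simp only [PySem.List.enumerate_cons, PySem.List.enumerate_nil]
  norm_num [chequeoA, PySem.Set.empty]
  simp only [show PySem.List.pyGetD [f0, f1, f2, f3] 1 ([] : List Int) = f1 from rfl,
    show PySem.List.pyGetD [f0, f1, f2, f3] 2 ([] : List Int) = f2 from rfl,
    show PySem.List.pyGetD [f0, f1, f2, f3] 3 ([] : List Int) = f3 from rfl,
    vacio, isEmpty_eq]
  rw [vacioD_comm f1 f0, vacioD_comm f2 f1, vacioD_comm f3 f2]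

-- a direct membership scan computes non-emptiness of the intersection
theorem any_contains (a b : List Int) :
    a.any (fun c => b.contains c) = !vacio a b := by
  simp only [vacio, isEmpty_eq]
  rw [Bool.eq_iff_iff]
  simp only [List.any_eq_true, List.contains_eq_mem, decide_eq_true_eq, Bool.not_eq_true',
    decide_eq_false_iff_not, List.eq_nil_iff_forall_not_mem]
  constructor
  · rintro ⟨x, hx, hxb⟩ h
    exact h x (by rw [PySem.Set.mem_inter]; simp [PySem.Set.mem_ofList, hx, hxb])
  · intro h
    by_contra hc
    push Not at hc
    apply h
    intro x hx
    rw [PySem.Set.mem_inter] at hx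
    simp only [PySem.Set.mem_ofList] at hx
    exact hc x hx.1 hx.2

-- the reduction: on a 4-node path, all-jars-covered collapses to the two end edges
theorem edge_reduction (e0 e1 e2 : Bool) :
    (e0 && ((e0 || e1) && ((e1 || e2) && e2))) = (e0 && e2) := by
  cases e0 <;> cases e1 <;> cases e2 <;> rfl

-- the fill loop preserves the length-4 shape of the jar list
theorem llenar_length (vars : List (Int × Int)) (vals : List Int) (fr : List (List Int))
    (h : llenarFrascos vars vals = some fr) : fr.length = 4 := by
  unfold llenarFrascos at h
  have key : ∀ (l : List ((Int × Int) × Int)) (st : Option (List (List Int))),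
      (∀ s, st = some s → s.length = 4) →
      ∀ r, l.foldl
        (fun acc pv =>
          match acc with
          | none => none
          | some fr =>
            match PySem.List.pyGet? fr (pv.1.1 - 1) with
            | none => none
            | some jar => some (PySem.List.pySetD fr (pv.1.1 - 1) (jar ++ [pv.2]))) st = some r →
        r.length = 4 := by
    intro l
    induction l with
    | nil => intro st hst r hr; exact hst r hr
    | cons p t ih =>
        intro st hst r hr
        simp only [List.foldl_cons] at hr
        apply ih _ _ _ hr
        intro s hs
        cases st with
        | none => simp at hs
        | some fr0 =>
            have h4 := hst fr0 rfl
            cases hg : PySem.List.pyGet? fr0 (p.1.1 - 1) with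
            | none => simp [hg] at hs
            | some jar =>
                simp only [hg] at hs
                cases hs
                simp [PySem.List.length_pySetD, h4]
  exact key _ _ (by intro s hs; cases hs; rfl) fr h

-- ===== VERDICT (by name: the statement is the Claim_ definition above) =====
theorem compartir_color_spec : Claim_equal_compartir_color := by
  intro vars vals _ _
  unfold Spec_compartir_color compartir_color compartir_color_alt
  cases h : llenarFrascos vars vals with
  | none => rfl
  | some fr =>
      have h4 := llenar_length vars vals fr h
      match fr, h4 with
      | [f0, f1, f2, f3], _ =>
        show chequeoA [f0, f1, f2, f3] (PySem.List.enumerate [f0, f1, f2, f3] 0) = _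
        rw [Aside, edge_reduction]
        simp only [show PySem.List.pyGetD [f0, f1, f2, f3] 0 ([] : List Int) = f0 from rfl,
          show PySem.List.pyGetD [f0, f1, f2, f3] 1 ([] : List Int) = f1 from rfl,
          show PySem.List.pyGetD [f0, f1, f2, f3] 2 ([] : List Int) = f2 from rfl,
          show PySem.List.pyGetD [f0, f1, f2, f3] 3 ([] : List Int) = f3 from rfl,
          any_contains]
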